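-- pv_equiv track=rewrite | github.com/andrewradin/duma | web1/dtk/text.py | split_multi_lines
-- ===== SOURCE A (Python) =====
-- def split_multi_lines(rows):
--     result = []
--     for row in rows:
--         if any('\n' in col for col in row):
--             stack = [x.split('\n') for x in row]
--             out_count = max(len(x) for x in stack)
--             for col in stack:
--                 missing = out_count - len(col)
--                 if missing:
--                     col += ['']*missing
--             for i in range(out_count):
--                 result.append([x[i] for x in stack])
--         else:
--             result.append(row)
--     return result
-- ===== SOURCE B (Python) =====
-- def split_multi_lines(rows):
--     result = []
--     for row in rows:
--         if any('\n' in col for col in row):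
--             # head/tail transpose: peel one output line per step, no padding pass
--             cols = [x.split('\n') for x in row]
--             while not all(len(c) == 0 for c in cols):
--                 result.append([c[0] if c else '' for c in cols])
--                 cols = [c[1:] for c in cols]
--         else:
--             result.append(row)
--     return result
-- ===== Notes on version B (the rewrite author's own statement) =====
-- stated objective: simpler
-- what changed: Replaces A's three-pass max-length/pad/index-transpose block with a single head/tail peeling loop that emits one output row per step until every split column is exhausted.
import Mathlib
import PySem

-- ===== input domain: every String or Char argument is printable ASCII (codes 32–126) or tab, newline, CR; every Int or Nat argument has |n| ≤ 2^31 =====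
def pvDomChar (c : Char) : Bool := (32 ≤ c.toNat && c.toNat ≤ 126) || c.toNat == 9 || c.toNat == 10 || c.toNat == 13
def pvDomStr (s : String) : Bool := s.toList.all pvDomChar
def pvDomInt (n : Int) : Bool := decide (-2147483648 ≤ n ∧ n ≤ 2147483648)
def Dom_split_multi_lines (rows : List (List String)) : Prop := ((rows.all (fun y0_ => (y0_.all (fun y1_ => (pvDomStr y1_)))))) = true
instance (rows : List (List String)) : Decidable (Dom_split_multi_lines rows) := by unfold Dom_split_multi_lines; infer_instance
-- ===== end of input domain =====

-- B replaces A's three-pass max/pad/index transpose with one head/tail peeling recursion (simpler decomposition; return value only, A mutates no caller data).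

-- ===== PORT A =====
def split_multi_lines (rows : List (List String)) : List (List String) :=
  rows.foldl (fun result row =>
    if row.any (fun col => PySem.Str.isIn "\n" col) then
      -- x.split('\n'): sep is the non-empty literal "\n", so split? is always some
      let stack := row.map (fun x => (PySem.Str.split? x "\n").getD [])
      -- max(len(x) for x in stack): the guard guarantees stack ≠ [], so max raises nowhere; getD 0 is unreached
      let out_count := ((stack.map (fun x => x.length)).max?).getD 0
      -- col += ['']*missing (the `if missing` guard is the identity when missing = 0)
      let stack := stack.map (fun col => col ++ List.replicate (out_count - col.length) "")
      -- x[i]: exact via getD since after padding i < out_count ≤ (padded x).length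
      result ++ (List.range out_count).map (fun i => stack.map (fun x => x.getD i ""))
    else
      result ++ [row]) []

-- ===== PORT B =====
-- termination measure for pvZipLongest (cited by its decreasing_by)
theorem pvZL_dec (c : List String) (cols : List (List String)) (hc : c ∈ cols) (hne : c ≠ []) :
    (cols.map (fun x => x.length - 1)).sum < (cols.map List.length).sum := by
  induction cols with
  | nil => cases hc
  | cons a t ih =>
    simp only [List.map_cons, List.sum_cons]
    rcases List.mem_cons.mp hc with rfl | hc
    · have hpos : 0 < c.length := List.length_pos_iff.mpr hne
      have hle : (t.map (fun x => x.length - 1)).sum ≤ (t.map List.length).sum := by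
        apply List.sum_le_sum; intro x hx; omega
      omega
    · have := ih hc
      omega

-- Source B's while loop: emit heads (or '') of all columns, drop one element from each, until all empty
def pvZipLongest (cols : List (List String)) : List (List String) :=
  if h : cols.all List.isEmpty then []
  else
    (cols.map (fun c => c.headD "")) :: pvZipLongest (cols.map (fun c => c.drop 1))
termination_by (cols.map List.length).sum
decreasing_by
  simp only [List.all_eq_true, List.isEmpty_iff] at h
  push Not at h
  obtain ⟨c, hc, hne⟩ := h
  have hrw : (List.map (fun x : {x // x ∈ cols} => List.drop 1 ↑x) cols.attach) = cols.map (fun c => List.drop 1 c) := by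
    simp
  rw [hrw]
  simp only [List.map_map, Function.comp_def, List.length_drop]
  exact pvZL_dec c cols hc hne

def split_multi_lines_alt (rows : List (List String)) : List (List String) :=
  rows.foldl (fun result row =>
    if row.any (fun col => PySem.Str.isIn "\n" col) then
      result ++ pvZipLongest (row.map (fun x => (PySem.Str.split? x "\n").getD []))
    else
      result ++ [row]) []

-- ===== PRECONDITION & SPEC =====
def Spec_split_multi_lines (rows : List (List String)) (out : List (List String)) : Prop := out = split_multi_lines_alt rows
instance (rows : List (List String)) (out : List (List String)) : Decidable (Spec_split_multi_lines rows out) := by unfold Spec_split_multi_lines; infer_instance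

-- ===== CLAIM (what is proved, stated in full; the proofs are below) =====
def Claim_equal_split_multi_lines : Prop := ∀ (rows : List (List String)), Dom_split_multi_lines rows → Spec_split_multi_lines rows (split_multi_lines rows)

-- ===== LEMMAS AND PROOFS =====

theorem pvFoldlMax (l : List Nat) (a : Nat) : l.foldl max a = max a (l.foldl max 0) := by
  induction l generalizing a with
  | nil => simp
  | cons b t ih =>
    simp only [List.foldl_cons]
    rw [ih (max a b), ih (max 0 b)]
    omega

theorem pvMaxD_eq_foldl (l : List Nat) : l.max?.getD 0 = l.foldl max 0 := by
  cases l with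
  | nil => rfl
  | cons a t =>
    rw [List.max?_cons', Option.getD_some, List.foldl_cons]
    simp

-- max?.getD 0 over a cons, as a plain max
theorem pvMaxD_cons (a : Nat) (l : List Nat) :
    ((a :: l).max?.getD 0) = max a (l.max?.getD 0) := by
  rw [pvMaxD_eq_foldl, pvMaxD_eq_foldl, List.foldl_cons]
  simp only [Nat.zero_max]
  exact pvFoldlMax l a

theorem pvLen_le_max (ls : List (List String)) (c : List String) (hc : c ∈ ls) :
    c.length ≤ ((ls.map (fun x => x.length)).max?.getD 0) := by
  induction ls with
  | nil => cases hc
  | cons a t ih =>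
    simp only [List.map_cons, pvMaxD_cons]
    rcases List.mem_cons.mp hc with rfl | hc
    · omega
    · have := ih hc; omega

theorem pvMax_all_empty (ls : List (List String)) (h : ∀ c ∈ ls, c = []) :
    ((ls.map (fun x => x.length)).max?.getD 0) = 0 := by
  induction ls with
  | nil => rfl
  | cons a t ih =>
    simp only [List.map_cons, pvMaxD_cons]
    have ha := h a (by simp)
    have := ih (fun c hc => h c (by simp [hc]))
    simp [ha, this]

-- padding does not change getD with default ""
theorem pvGetD_pad (col : List String) (i k : Nat) :
    (col ++ List.replicate k "").getD i "" = col.getD i "" := by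
  simp only [List.getD, List.getElem?_append, List.getElem?_replicate]
  by_cases h : i < col.length
  · simp [h]
  · simp [h]
    split <;> simp

theorem pvHeadD_eq_getD (x : List String) : x.headD "" = x.getD 0 "" := by
  cases x <;> rfl

theorem pvDrop_getD (x : List String) (i : Nat) : (x.drop 1).getD i "" = x.getD (i+1) "" := by
  cases x <;> rfl

theorem pvMaxlen_drop (ls : List (List String)) :
    (((ls.map (fun c => c.drop 1)).map (fun x => x.length)).max?.getD 0)
      = ((ls.map (fun x => x.length)).max?.getD 0) - 1 := by
  induction ls with
  | nil => rfl
  | cons a t ih =>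
    simp only [List.map_cons, pvMaxD_cons, List.length_drop] at *
    omega

-- the key lemma: the head/tail peeling recursion equals A's indexed transpose
theorem pvZipLongest_eq (n : Nat) (ls : List (List String))
    (hn : ((ls.map (fun x => x.length)).max?.getD 0) = n) :
    pvZipLongest ls
      = (List.range n).map (fun i => ls.map (fun x => x.getD i "")) := by
  induction n generalizing ls with
  | zero =>
    rw [pvZipLongest]
    have hall : ls.all List.isEmpty = true := by
      simp only [List.all_eq_true, List.isEmpty_iff]
      intro c hc
      have := pvLen_le_max ls c hc
      have : c.length = 0 := by omega
      exact List.length_eq_zero_iff.mp this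
    simp [hall]
  | succ n ih =>
    rw [pvZipLongest]
    have hne : ¬ (ls.all List.isEmpty = true) := by
      intro hall
      simp only [List.all_eq_true, List.isEmpty_iff] at hall
      have := pvMax_all_empty ls hall
      omega
    rw [dif_neg hne]
    have htail : (((ls.map (fun c => c.drop 1)).map (fun x => x.length)).max?.getD 0) = n := by
      rw [pvMaxlen_drop]; omega
    rw [ih _ htail]
    rw [List.range_succ_eq_map]
    simp only [List.map_cons, List.map_map]
    congr 1
    · exact List.map_congr_left (fun x _ => pvHeadD_eq_getD x)
    · apply List.map_congr_left
      intro i _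
      simp only [Function.comp_def]
      exact List.map_congr_left (fun x _ => pvDrop_getD x i)

-- the two per-row steps are equal
theorem pvStep_eq (result : List (List String)) (row : List String) :
    (if row.any (fun col => PySem.Str.isIn "\n" col) then
      let stack := row.map (fun x => (PySem.Str.split? x "\n").getD [])
      let out_count := ((stack.map (fun x => x.length)).max?).getD 0
      let stack := stack.map (fun col => col ++ List.replicate (out_count - col.length) "")
      result ++ (List.range out_count).map (fun i => stack.map (fun x => x.getD i ""))
    else result ++ [row])
    = (if row.any (fun col => PySem.Str.isIn "\n" col) then
        result ++ pvZipLongest (row.map (fun x => (PySem.Str.split? x "\n").getD []))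
      else result ++ [row]) := by
  by_cases h : row.any (fun col => PySem.Str.isIn "\n" col)
  · rw [if_pos h, if_pos h]
    show result ++ _ = result ++ _
    congr 1
    rw [pvZipLongest_eq _ _ rfl]
    apply List.map_congr_left
    intro i _
    rw [List.map_map]
    exact List.map_congr_left (fun x _ => pvGetD_pad _ i _)
  · rw [if_neg h, if_neg h]

theorem pvFold_eq (rows : List (List String)) (acc : List (List String)) :
    rows.foldl (fun result row =>
      if row.any (fun col => PySem.Str.isIn "\n" col) then
        let stack := row.map (fun x => (PySem.Str.split? x "\n").getD [])
        let out_count := ((stack.map (fun x => x.length)).max?).getD 0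
        let stack := stack.map (fun col => col ++ List.replicate (out_count - col.length) "")
        result ++ (List.range out_count).map (fun i => stack.map (fun x => x.getD i ""))
      else result ++ [row]) acc
    = rows.foldl (fun result row =>
        if row.any (fun col => PySem.Str.isIn "\n" col) then
          result ++ pvZipLongest (row.map (fun x => (PySem.Str.split? x "\n").getD []))
        else result ++ [row]) acc := by
  induction rows generalizing acc with
  | nil => rfl
  | cons r t ih =>
    simp only [List.foldl_cons]
    rw [pvStep_eq, ih]

-- ===== VERDICT (by name: the statement is the Claim_ definition above) =====
theorem split_multi_lines_spec : Claim_equal_split_multi_lines := by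
  intro rows _
  unfold Spec_split_multi_lines split_multi_lines split_multi_lines_alt
  exact pvFold_eq rows []
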